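-- pv_equiv track=rewrite | github.com/jshph/enzyme-sdk-python | examples/prepare_nyt_data.py | derive_folder
-- ===== SOURCE A (Python) =====
-- def derive_folder(tags: list[str], recipe_name: str) -> str:
--     """Derive a folder grouping from tags — represents behavioral clusters."""
--     name = recipe_name.lower()
--
--     if any(t in tags for t in ["baking", "dessert"]):
--         return "baking-and-desserts"
--     if any(t in tags for t in ["pasta", "noodles", "italian"]):
--         return "pasta-and-noodles"
--     if any(t in tags for t in ["soup", "stew"]):
--         return "soups-and-stews"
--     if any(t in tags for t in ["salad"]):
--         return "salads"
--     if any(t in tags for t in ["breakfast", "sandwich"]):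
--         return "breakfast-and-light"
--     if any(t in tags for t in ["grilling"]):
--         return "grilling"
--     if "side" in name or "vegetable" in name:
--         return "sides"
--
--     return "mains"
-- ===== SOURCE B (Python) =====
-- _KEYWORDS = {
--     "baking": (0, "baking-and-desserts"),
--     "dessert": (0, "baking-and-desserts"),
--     "pasta": (1, "pasta-and-noodles"),
--     "noodles": (1, "pasta-and-noodles"),
--     "italian": (1, "pasta-and-noodles"),
--     "soup": (2, "soups-and-stews"),
--     "stew": (2, "soups-and-stews"),
--     "salad": (3, "salads"),
--     "breakfast": (4, "breakfast-and-light"),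
--     "sandwich": (4, "breakfast-and-light"),
--     "grilling": (5, "grilling"),
-- }
--
--
-- def derive_folder(tags: list[str], recipe_name: str) -> str:
--     """Single inverted-lookup pass over tags; name check only when no tag matched."""
--     best = None
--     for t in tags:
--         hit = _KEYWORDS.get(t)
--         if hit is not None and (best is None or hit[0] < best[0]):
--             best = hit
--     if best is not None:
--         return best[1]
--     name = recipe_name.lower()
--     return "sides" if ("side" in name or "vegetable" in name) else "mains"
-- ===== Notes on version B (the rewrite author's own statement) =====
-- stated objective: idiomatic
-- what changed: Replaces the six ordered per-category membership scans over tags with one inverted keyword->(rank, folder) table and a single pass over tags keeping the minimum-rank hit.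
import Mathlib
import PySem

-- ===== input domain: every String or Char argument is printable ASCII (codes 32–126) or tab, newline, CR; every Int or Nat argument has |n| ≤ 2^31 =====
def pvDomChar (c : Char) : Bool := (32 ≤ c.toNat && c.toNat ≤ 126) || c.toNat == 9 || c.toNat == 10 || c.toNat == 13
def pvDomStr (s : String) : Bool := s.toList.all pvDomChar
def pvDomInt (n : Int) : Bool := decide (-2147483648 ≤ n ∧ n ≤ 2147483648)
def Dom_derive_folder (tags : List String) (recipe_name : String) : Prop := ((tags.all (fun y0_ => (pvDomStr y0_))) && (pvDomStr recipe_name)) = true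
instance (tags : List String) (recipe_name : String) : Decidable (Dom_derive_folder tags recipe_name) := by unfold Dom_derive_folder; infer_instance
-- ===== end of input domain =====

-- B replaces A's six ordered per-category membership scans by one inverted keyword->(rank,folder)
-- table and a single minimum-rank pass over tags (idiomatic restructuring, same results).


-- ===== PORT A =====
def derive_folder (tags : List String) (recipe_name : String) : String :=
  let name := PySem.Str.lower recipe_name
  if ["baking", "dessert"].any (fun t => tags.contains t) then "baking-and-desserts"
  else if ["pasta", "noodles", "italian"].any (fun t => tags.contains t) then "pasta-and-noodles"
  else if ["soup", "stew"].any (fun t => tags.contains t) then "soups-and-stews"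
  else if ["salad"].any (fun t => tags.contains t) then "salads"
  else if ["breakfast", "sandwich"].any (fun t => tags.contains t) then "breakfast-and-light"
  else if ["grilling"].any (fun t => tags.contains t) then "grilling"
  else if PySem.Str.isIn "side" name || PySem.Str.isIn "vegetable" name then "sides"
  else "mains"

-- ===== PORT B =====
-- the module-level _KEYWORDS dict of Source B (literal keys: lookup = first match)
def dfKeywords : List (String × (Nat × String)) :=
  [("baking", (0, "baking-and-desserts")),
   ("dessert", (0, "baking-and-desserts")),
   ("pasta", (1, "pasta-and-noodles")),
   ("noodles", (1, "pasta-and-noodles")),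
   ("italian", (1, "pasta-and-noodles")),
   ("soup", (2, "soups-and-stews")),
   ("stew", (2, "soups-and-stews")),
   ("salad", (3, "salads")),
   ("breakfast", (4, "breakfast-and-light")),
   ("sandwich", (4, "breakfast-and-light")),
   ("grilling", (5, "grilling"))]

def derive_folder_alt (tags : List String) (recipe_name : String) : String :=
  let best := tags.foldl (fun best t =>
    match dfKeywords.lookup t with
    | none => best
    | some hit =>
      match best with
      | none => some hit
      | some b => if hit.1 < b.1 then some hit else best) none
  match best with
  | some b => b.2
  | none =>
    let name := PySem.Str.lower recipe_name
    if PySem.Str.isIn "side" name || PySem.Str.isIn "vegetable" name then "sides" else "mains"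

-- ===== PRECONDITION & SPEC =====
def Spec_derive_folder (tags : List String) (recipe_name : String) (out : String) : Prop := out = derive_folder_alt tags recipe_name
instance (tags : List String) (recipe_name : String) (out : String) : Decidable (Spec_derive_folder tags recipe_name out) := by unfold Spec_derive_folder; infer_instance

-- ===== CLAIM (what is proved, stated in full; the proofs are below) =====
def Claim_equal_derive_folder : Prop := ∀ (tags : List String) (recipe_name : String), Dom_derive_folder tags recipe_name → Spec_derive_folder tags recipe_name (derive_folder tags recipe_name)

-- ===== LEMMAS AND PROOFS =====

-- the min-by-rank combination B's loop performs on its accumulator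
def dfCombine (x y : Option (Nat × String)) : Option (Nat × String) :=
  match x, y with
  | none, y => y
  | x, none => x
  | some a, some b => if b.1 < a.1 then some b else some a

-- the category chosen by A's ordered scans, as a function of keyword membership
def dfSpec (tags : List String) : Option (Nat × String) :=
  if tags.contains "baking" || tags.contains "dessert" then some (0, "baking-and-desserts")
  else if tags.contains "pasta" || tags.contains "noodles" || tags.contains "italian" then some (1, "pasta-and-noodles")
  else if tags.contains "soup" || tags.contains "stew" then some (2, "soups-and-stews")
  else if tags.contains "salad" then some (3, "salads")
  else if tags.contains "breakfast" || tags.contains "sandwich" then some (4, "breakfast-and-light")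
  else if tags.contains "grilling" then some (5, "grilling")
  else none

theorem dfCombine_none_right (x : Option (Nat × String)) : dfCombine x none = x := by
  cases x <;> rfl

theorem dfCombine_assoc (x y z : Option (Nat × String)) :
    dfCombine (dfCombine x y) z = dfCombine x (dfCombine y z) := by
  rcases x with _ | a <;> rcases y with _ | b <;> rcases z with _ | c <;> try rfl
  case some.some.none => simp [dfCombine_none_right]
  case some.some.some =>
  by_cases hba : b.1 < a.1 <;> by_cases hcb : c.1 < b.1 <;> by_cases hca : c.1 < a.1 <;>
    simp [dfCombine, hba, hcb, hca] <;> first | rfl | omega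

set_option maxHeartbeats 1000000 in
theorem dfSpec_cons (t : String) (tags : List String) :
    dfSpec (t :: tags) = dfCombine (dfKeywords.lookup t) (dfSpec tags) := by
  by_cases h0 : t = "baking"
  · subst h0
    rw [show dfKeywords.lookup "baking" = some (0, "baking-and-desserts") from rfl]
    simp [dfSpec, dfCombine]
    split_ifs <;> simp_all
  by_cases h1 : t = "dessert"
  · subst h1
    rw [show dfKeywords.lookup "dessert" = some (0, "baking-and-desserts") from rfl]
    simp [dfSpec, dfCombine]
    split_ifs <;> simp_all
  by_cases h2 : t = "pasta"
  · subst h2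
    rw [show dfKeywords.lookup "pasta" = some (1, "pasta-and-noodles") from rfl]
    simp [dfSpec, dfCombine]
    split_ifs <;> simp_all
  by_cases h3 : t = "noodles"
  · subst h3
    rw [show dfKeywords.lookup "noodles" = some (1, "pasta-and-noodles") from rfl]
    simp [dfSpec, dfCombine]
    split_ifs <;> simp_all
  by_cases h4 : t = "italian"
  · subst h4
    rw [show dfKeywords.lookup "italian" = some (1, "pasta-and-noodles") from rfl]
    simp [dfSpec, dfCombine]
    split_ifs <;> simp_all
  by_cases h5 : t = "soup"
  · subst h5
    rw [show dfKeywords.lookup "soup" = some (2, "soups-and-stews") from rfl]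
    simp [dfSpec, dfCombine]
    split_ifs <;> simp_all
  by_cases h6 : t = "stew"
  · subst h6
    rw [show dfKeywords.lookup "stew" = some (2, "soups-and-stews") from rfl]
    simp [dfSpec, dfCombine]
    split_ifs <;> simp_all
  by_cases h7 : t = "salad"
  · subst h7
    rw [show dfKeywords.lookup "salad" = some (3, "salads") from rfl]
    simp [dfSpec, dfCombine]
    split_ifs <;> simp_all
  by_cases h8 : t = "breakfast"
  · subst h8
    rw [show dfKeywords.lookup "breakfast" = some (4, "breakfast-and-light") from rfl]
    simp [dfSpec, dfCombine]
    split_ifs <;> simp_all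
  by_cases h9 : t = "sandwich"
  · subst h9
    rw [show dfKeywords.lookup "sandwich" = some (4, "breakfast-and-light") from rfl]
    simp [dfSpec, dfCombine]
    split_ifs <;> simp_all
  by_cases h10 : t = "grilling"
  · subst h10
    rw [show dfKeywords.lookup "grilling" = some (5, "grilling") from rfl]
    simp [dfSpec, dfCombine]
    split_ifs <;> simp_all
  have e0 : (t == "baking") = false := by simp [h0]
  have e1 : (t == "dessert") = false := by simp [h1]
  have e2 : (t == "pasta") = false := by simp [h2]
  have e3 : (t == "noodles") = false := by simp [h3]
  have e4 : (t == "italian") = false := by simp [h4]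
  have e5 : (t == "soup") = false := by simp [h5]
  have e6 : (t == "stew") = false := by simp [h6]
  have e7 : (t == "salad") = false := by simp [h7]
  have e8 : (t == "breakfast") = false := by simp [h8]
  have e9 : (t == "sandwich") = false := by simp [h9]
  have e10 : (t == "grilling") = false := by simp [h10]
  simp [dfSpec, dfKeywords, dfCombine, List.lookup, e0, e1, e2, e3, e4, e5, e6, e7, e8, e9, e10, Ne.symm h0, Ne.symm h1, Ne.symm h2, Ne.symm h3, Ne.symm h4, Ne.symm h5, Ne.symm h6, Ne.symm h7, Ne.symm h8, Ne.symm h9, Ne.symm h10]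

theorem df_foldl_eq (tags : List String) (acc : Option (Nat × String)) :
    tags.foldl (fun best t =>
      match dfKeywords.lookup t with
      | none => best
      | some hit =>
        match best with
        | none => some hit
        | some b => if hit.1 < b.1 then some hit else best) acc
    = dfCombine acc (dfSpec tags) := by
  induction tags generalizing acc with
  | nil => simp [dfSpec, dfCombine]; cases acc <;> rfl
  | cons t rest ih =>
    rw [List.foldl_cons, ih, dfSpec_cons, ← dfCombine_assoc]
    congr 1
    rcases h : dfKeywords.lookup t with _ | hit <;> rcases acc with _ | a <;>
      simp [dfCombine]

-- ===== VERDICT (by name: the statement is the Claim_ definition above) =====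
theorem derive_folder_spec : Claim_equal_derive_folder := by
  intro tags recipe_name _
  show derive_folder tags recipe_name = derive_folder_alt tags recipe_name
  unfold derive_folder derive_folder_alt
  rw [df_foldl_eq]
  simp only [dfCombine, dfSpec, List.any_cons, List.any_nil, Bool.or_false]
  split_ifs <;> simp_all
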